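-- pv_equiv track=rewrite | github.com/arnoldaz/advent-of-code | 2025/02.py | check_repeating
-- ===== SOURCE A (Python) =====
-- def check_repeating(digits: list[int], amount: int, limit_twice: bool) -> bool:
--     split_lists: list[list[int]] = []
--
--     i = 0
--     while i < len(digits):
--         new_list: list[int] = []
--         for _ in range(amount):
--             if i == len(digits):
--                 break
--             new_list.append(digits[i])
--             i += 1
--         split_lists.append(new_list)
--
--     if limit_twice and len(split_lists) > 2:
--         return False
--
--     for split_list in split_lists:
--         if split_list != split_lists[0]:
--             return False
--
--     return True
-- ===== SOURCE B (Python) =====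
-- def check_repeating(digits: list[int], amount: int, limit_twice: bool) -> bool:
--     n = len(digits)
--     num = -(-n // amount)  # number of chunks (ceiling division)
--     if limit_twice and num > 2:
--         return False
--     if n % amount != 0:
--         # a shorter final chunk can only match when it is the one and only chunk
--         return num <= 1
--     return digits == digits[:amount] * num
-- ===== Notes on version B (the rewrite author's own statement) =====
-- stated objective: simpler
-- what changed: B never materialises the list of chunks: it computes the chunk count by ceiling division and decides repetition with one comparison of digits against the first chunk tiled num times, instead of A's explicit element-by-element while/for splitting loop followed by a scan comparing every chunk to the first (constant-factor speedup from avoiding per-element appends).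
-- outside the precondition, e.g. on check_repeating([], 0, False): A returns True, B raises ZeroDivisionError
import Mathlib
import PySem

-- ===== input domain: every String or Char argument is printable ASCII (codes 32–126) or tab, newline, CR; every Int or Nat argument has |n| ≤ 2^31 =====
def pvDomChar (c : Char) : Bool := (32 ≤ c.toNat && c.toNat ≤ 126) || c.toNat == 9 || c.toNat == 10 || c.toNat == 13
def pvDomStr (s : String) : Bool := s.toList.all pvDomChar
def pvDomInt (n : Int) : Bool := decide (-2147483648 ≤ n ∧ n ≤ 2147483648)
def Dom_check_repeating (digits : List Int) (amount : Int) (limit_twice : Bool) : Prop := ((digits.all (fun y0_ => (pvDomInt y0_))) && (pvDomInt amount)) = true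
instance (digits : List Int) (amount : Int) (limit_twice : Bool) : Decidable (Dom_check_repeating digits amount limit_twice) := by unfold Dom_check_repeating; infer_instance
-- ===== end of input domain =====

-- B replaces A's chunk-splitting while/for loop and chunk-comparison scan by a ceiling-division
-- chunk count and a single comparison of digits with its first chunk tiled (objective: simpler).

-- ===== PORT A =====
-- inner 'for _ in range(amount)' loop: recursion on the remaining iteration count;
-- digits[i] is ported as digits.getD i 0 — on every reachable state i < digits.length (the
-- i == len(digits) break fires first), so the default is never used and the port is exact.
def innerFor (digits : List Int) : Nat → Nat → List Int → List Int × Nat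
  | 0, i, acc => (acc.reverse, i)
  | k+1, i, acc =>
    if i = digits.length then (acc.reverse, i)
    else innerFor digits k (i+1) (digits.getD i 0 :: acc)

-- outer 'while i < len(digits)' loop with fuel digits.length + 1: when amount ≥ 1 each
-- iteration increases i, so the fuel is never exhausted; for amount ≤ 0 and nonempty digits
-- the Python loops forever (excluded by Pre_), and the fuel-0 branch is unreachable inside Pre_.
def outerLoop (digits : List Int) (amount : Int) : Nat → Nat → List (List Int) → List (List Int)
  | 0, _, acc => acc.reverse
  | fuel+1, i, acc =>
    if i < digits.length then
      match innerFor digits amount.toNat i [] with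
      | (nl, i') => outerLoop digits amount fuel i' (nl :: acc)
    else acc.reverse

-- final 'for split_list in split_lists: if split_list != split_lists[0]: return False'
-- (split_lists[0] is only evaluated when the loop runs, so headD's default is never used)
def allEqFirst (split_lists : List (List Int)) : List (List Int) → Bool
  | [] => true
  | c :: rest => if c ≠ split_lists.headD [] then false else allEqFirst split_lists rest

def check_repeating (digits : List Int) (amount : Int) (limit_twice : Bool) : Bool :=
  let split_lists := outerLoop digits amount (digits.length + 1) 0 []
  if limit_twice && decide ((split_lists.length : Int) > 2) then false
  else allEqFirst split_lists split_lists

-- ===== PORT B =====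
-- Python 'chunk * num' (num may be ≤ 0, giving [])
def repChunk (c : List Int) : Nat → List Int
  | 0 => []
  | k+1 => c ++ repChunk c k

def check_repeating_alt (digits : List Int) (amount : Int) (limit_twice : Bool) : Bool :=
  let n : Int := digits.length
  let num : Int := -(PySem.Int.floordiv (-n) amount)
  if limit_twice && decide (num > 2) then false
  else if PySem.Int.mod n amount ≠ 0 then decide (num ≤ 1)
  else digits == repChunk (PySem.List.slice digits none (some amount)) num.toNat

-- ===== PRECONDITION & SPEC =====
-- Pre_ excludes amount ≤ 0 except the empty-digits/negative-amount corner: for amount ≤ 0 and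
-- nonempty digits A's while loop never advances i and diverges, and at amount = 0 (any digits)
-- B raises ZeroDivisionError while A diverges or (empty digits) returns True.
def Pre_check_repeating (digits : List Int) (amount : Int) (limit_twice : Bool) : Prop :=
  1 ≤ amount ∨ (digits = [] ∧ amount < 0)
instance (digits : List Int) (amount : Int) (limit_twice : Bool) : Decidable (Pre_check_repeating digits amount limit_twice) := by unfold Pre_check_repeating; infer_instance

def pvWitness_check_repeating : List Int × Int × Bool := ([1, 2, 1, 2], 2, true)

def Spec_check_repeating (digits : List Int) (amount : Int) (limit_twice : Bool) (out : Bool) : Prop := out = check_repeating_alt digits amount limit_twice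
instance (digits : List Int) (amount : Int) (limit_twice : Bool) (out : Bool) : Decidable (Spec_check_repeating digits amount limit_twice out) := by unfold Spec_check_repeating; infer_instance

-- ===== CLAIM (what is proved, stated in full; the proofs are below) =====
def Claim_equal_check_repeating : Prop := ∀ (digits : List Int) (amount : Int) (limit_twice : Bool), Dom_check_repeating digits amount limit_twice → Pre_check_repeating digits amount limit_twice → Spec_check_repeating digits amount limit_twice (check_repeating digits amount limit_twice)

-- ===== LEMMAS AND PROOFS =====

-- proof-side model of A's splitting: chunks of size a (only used with 1 ≤ a)
def chunksA : Nat → List Int → List (List Int)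
  | _, [] => []
  | 0, _ :: _ => []
  | a+1, x :: xs => ((x :: xs).take (a+1)) :: chunksA (a+1) ((x :: xs).drop (a+1))
termination_by _ l => l.length
decreasing_by simp

theorem chunksA_nil (a : Nat) : chunksA a [] = [] := by
  rw [chunksA.eq_def]

theorem chunksA_cons (a : Nat) (ha : 1 ≤ a) (l : List Int) (hl : l ≠ []) :
    chunksA a l = l.take a :: chunksA a (l.drop a) := by
  rw [chunksA.eq_def]
  match a, l with
  | a+1, x :: xs => rfl

theorem innerFor_eq (digits : List Int) (k : Nat) : ∀ (i : Nat) (acc : List Int),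
    i ≤ digits.length →
    innerFor digits k i acc = (acc.reverse ++ (digits.drop i).take k, min (i + k) digits.length) := by
  induction k with
  | zero => intro i acc h; simp [innerFor, Nat.min_eq_left h]
  | succ k ih =>
    intro i acc h
    by_cases hi : i = digits.length
    · subst hi
      simp [innerFor, List.drop_length]
    · have hlt : i < digits.length := lt_of_le_of_ne h hi
      rw [innerFor, if_neg hi, ih (i+1) _ hlt]
      rw [List.drop_eq_getElem_cons hlt, List.take_succ_cons]
      rw [Prod.mk.injEq]
      refine ⟨?_, by omega⟩
      rw [List.getD_eq_getElem digits 0 hlt]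
      simp

theorem outer_eq (digits : List Int) (amount : Int) (ha : 1 ≤ amount.toNat) :
    ∀ (fuel i : Nat) (acc : List (List Int)), i ≤ digits.length → digits.length - i ≤ fuel →
    outerLoop digits amount fuel i acc = acc.reverse ++ chunksA amount.toNat (digits.drop i) := by
  intro fuel
  induction fuel with
  | zero =>
    intro i acc h hf
    have : i = digits.length := by omega
    subst this
    simp [outerLoop, List.drop_length, chunksA_nil]
  | succ fuel ih =>
    intro i acc h hf
    by_cases hi : i < digits.length
    · rw [outerLoop, if_pos hi, innerFor_eq digits amount.toNat i [] h]
      simp only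
      rw [ih (min (i + amount.toNat) digits.length) _ (by omega) (by omega)]
      rw [chunksA_cons amount.toNat ha (digits.drop i) (by simp; omega)]
      have hdd : (digits.drop i).drop amount.toNat = digits.drop (min (i + amount.toNat) digits.length) := by
        rw [List.drop_drop]
        by_cases hc : i + amount.toNat ≤ digits.length
        · rw [Nat.min_eq_left hc]
        · rw [Nat.min_eq_right (by omega), List.drop_length,
            List.drop_eq_nil_of_le (by omega)]
      simp [hdd]
    · have : i = digits.length := by omega
      subst this
      simp [outerLoop, List.drop_length, chunksA_nil]

theorem chunksA_flatten (a : Nat) (ha : 1 ≤ a) (l : List Int) : (chunksA a l).flatten = l := by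
  match a, l with
  | a, [] => rw [chunksA_nil]; rfl
  | a+1, x :: xs =>
    rw [chunksA_cons (a+1) ha (x :: xs) (by simp)]
    rw [List.flatten_cons, chunksA_flatten (a+1) ha ((x :: xs).drop (a+1))]
    exact List.take_append_drop _ _
termination_by l.length
decreasing_by simp

theorem chunksA_len_le (a : Nat) (ha : 1 ≤ a) (l : List Int) (k : Nat) :
    (chunksA a l).length ≤ k ↔ l.length ≤ k * a := by
  match l, k with
  | [], k => simp [chunksA_nil]
  | x :: xs, 0 => simp [chunksA_cons a ha (x :: xs) (by simp)]
  | x :: xs, k+1 =>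
    rw [chunksA_cons a ha (x :: xs) (by simp)]
    simp only [List.length_cons]
    rw [Nat.add_le_add_iff_right, chunksA_len_le a ha ((x :: xs).drop a) k,
      List.length_drop, Nat.succ_mul, List.length_cons]
    omega
termination_by l.length
decreasing_by simp; omega

theorem repChunk_length (c : List Int) (m : Nat) : (repChunk c m).length = m * c.length := by
  induction m with
  | zero => simp [repChunk]
  | succ m ih => simp [repChunk, ih, Nat.succ_mul]; omega

theorem chunksA_repChunk (a : Nat) (ha : 1 ≤ a) (c : List Int) (hc : c.length = a) (m : Nat) :
    chunksA a (repChunk c m) = List.replicate m c := by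
  induction m with
  | zero => simp [repChunk, chunksA_nil]
  | succ m ih =>
    have hcne : c ≠ [] := by intro h; subst h; simp at hc; omega
    have ht : (c ++ repChunk c m).take a = c := by rw [← hc]; exact List.take_left
    have hd : (c ++ repChunk c m).drop a = repChunk c m := by rw [← hc]; exact List.drop_left
    rw [repChunk, chunksA_cons a ha (c ++ repChunk c m) (by simp [hcne]),
      ht, hd, ih, List.replicate_succ]

theorem allEqFirst_eq (L : List (List Int)) : ∀ xs, allEqFirst L xs = xs.all (· == L.headD []) := by
  intro xs
  induction xs with
  | nil => simp [allEqFirst]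
  | cons c rest ih =>
    rw [allEqFirst, ih]
    by_cases h : c = L.headD [] <;> simp [h, Bool.beq_eq_decide_eq]

theorem allEqFirst_iff (L : List (List Int)) :
    allEqFirst L L = true ↔ ∀ c ∈ L, c = L.headD [] := by
  rw [allEqFirst_eq]
  simp

theorem repChunk_eq_flatten (c : List Int) (m : Nat) :
    repChunk c m = (List.replicate m c).flatten := by
  induction m with
  | zero => rfl
  | succ m ih => simp [repChunk, ih, List.replicate_succ]

-- forward direction of the repetition characterisation
theorem all_eq_repChunk (a : Nat) (ha : 1 ≤ a) (l : List Int)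
    (h : ∀ c ∈ chunksA a l, c = (chunksA a l).headD []) :
    l = repChunk (l.take a) (chunksA a l).length := by
  rcases eq_or_ne l [] with rfl | hl
  · simp [chunksA_nil, repChunk]
  · have hc : chunksA a l = l.take a :: chunksA a (l.drop a) := chunksA_cons a ha l hl
    have hh : (chunksA a l).headD [] = l.take a := by rw [hc]; rfl
    have hrep : chunksA a l = List.replicate (chunksA a l).length (l.take a) := by
      rw [List.eq_replicate_iff]
      exact ⟨rfl, fun b hb => hh ▸ h b hb⟩
    calc l = (chunksA a l).flatten := (chunksA_flatten a ha l).symm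
    _ = (List.replicate (chunksA a l).length (l.take a)).flatten := by rw [← hrep]
    _ = repChunk (l.take a) (chunksA a l).length := (repChunk_eq_flatten _ _).symm

theorem num_le_iff (n : Nat) (amount : Int) (ha : 1 ≤ amount) (q : Int) :
    -(PySem.Int.floordiv (-(n : Int)) amount) ≤ q ↔ (n : Int) ≤ q * amount := by
  rw [neg_le, PySem.Int.le_floordiv_iff_mul_le (by omega)]
  constructor <;> intro h <;> nlinarith

theorem main_eq (digits : List Int) (amount : Int) (lt : Bool) (h1 : 1 ≤ amount) :
    check_repeating digits amount lt = check_repeating_alt digits amount lt := by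
  have ha : 1 ≤ amount.toNat := by omega
  have hcast : (amount.toNat : Int) = amount := Int.toNat_of_nonneg (by omega)
  have hL : outerLoop digits amount (digits.length + 1) 0 [] = chunksA amount.toNat digits := by
    rw [outer_eq digits amount ha (digits.length + 1) 0 [] (by omega) (by omega)]
    simp
  have hnum_le := num_le_iff digits.length amount h1
  have hkey : ∀ k : Nat, ((chunksA amount.toNat digits).length ≤ k ↔
      -(PySem.Int.floordiv (-((digits.length : Nat) : Int)) amount) ≤ (k : Int)) := by
    intro k
    rw [chunksA_len_le amount.toNat ha digits k, hnum_le (k : Int), ← hcast]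
    constructor <;> intro h <;> exact_mod_cast h
  have hmod : PySem.Int.mod ((digits.length : Nat) : Int) amount = 0 ↔ amount.toNat ∣ digits.length := by
    rw [PySem.Int.mod_eq_zero_iff_dvd, ← hcast]
    exact Int.natCast_dvd_natCast
  have hslice : PySem.List.slice digits none (some amount) = digits.take amount.toNat := by
    have h := PySem.List.slice_to digits (show (0 : Int) ≤ amount by omega)
    exact h
  rw [check_repeating, check_repeating_alt]
  simp only [hL, hslice]
  have hgd : decide (((chunksA amount.toNat digits).length : Int) > 2) =
      decide (-(PySem.Int.floordiv (-((digits.length : Nat) : Int)) amount) > 2) := by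
    rw [decide_eq_decide]
    have h2 := hkey 2
    constructor
    · intro hgt
      by_contra hng
      push_neg at hng
      have := h2.mpr (by omega)
      omega
    · intro hgt
      by_contra hng
      push_neg at hng
      have := h2.mp (by omega)
      omega
  rw [hgd]
  cases hcond : (lt && decide (-(PySem.Int.floordiv (-((digits.length : Nat) : Int)) amount) > 2)) with
  | true => simp
  | false =>
    simp only [Bool.false_eq_true, if_false]
    by_cases hm : PySem.Int.mod ((digits.length : Nat) : Int) amount = 0
    · -- divisible case: compare with the tiled first chunk
      rw [if_neg (by simp [hm])]
      have hdvd : amount.toNat ∣ digits.length := hmod.mp hm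
      rcases Nat.eq_zero_or_pos digits.length with h0 | hpos
      · have hdn : digits = [] := List.eq_nil_of_length_eq_zero h0
        subst hdn
        simp only [List.length_nil] at *
        have : -(PySem.Int.floordiv (-((0 : Nat) : Int)) amount) = ((0 : Nat) : Int) := by
          have ha' := (hnum_le 0).mpr (by simp)
          have hb' : ¬ (-(PySem.Int.floordiv (-((0 : Nat) : Int)) amount) ≤ -1) := by
            rw [hnum_le]
            omega
          omega
        rw [this]
        simp [chunksA_nil, allEqFirst, repChunk]
      · have hna : amount.toNat ≤ digits.length := Nat.le_of_dvd hpos hdvd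
        have hq0 : ((digits.length / amount.toNat : Nat) : Int) * amount = ((digits.length : Nat) : Int) := by
          have hdc := Nat.div_mul_cancel hdvd
          calc ((digits.length / amount.toNat : Nat) : Int) * amount
              = ((digits.length / amount.toNat : Nat) : Int) * ((amount.toNat : Nat) : Int) := by
                rw [hcast]
            _ = ((digits.length / amount.toNat * amount.toNat : Nat) : Int) := by push_cast; ring
            _ = ((digits.length : Nat) : Int) := by rw [hdc]
        have hnumEq : -(PySem.Int.floordiv (-((digits.length : Nat) : Int)) amount) =
            ((digits.length / amount.toNat : Nat) : Int) := by
          have h1' := (hnum_le ((digits.length / amount.toNat : Nat) : Int)).mpr (le_of_eq hq0.symm)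
          have h2' : ¬ (-(PySem.Int.floordiv (-((digits.length : Nat) : Int)) amount) ≤
              ((digits.length / amount.toNat : Nat) : Int) - 1) := by
            rw [hnum_le, sub_mul, one_mul, hq0]
            omega
          omega
        rw [hnumEq, Int.toNat_natCast, Bool.beq_eq_decide_eq, Bool.eq_iff_iff,
          decide_eq_true_eq, allEqFirst_iff]
        have hc0len : (digits.take amount.toNat).length = amount.toNat := by
          rw [List.length_take]
          omega
        constructor
        · intro hall
          have hrep := all_eq_repChunk amount.toNat ha digits hall
          have hlen : digits.length = (chunksA amount.toNat digits).length * amount.toNat := by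
            conv_lhs => rw [hrep]
            rw [repChunk_length, hc0len]
          have hmq : (chunksA amount.toNat digits).length = digits.length / amount.toNat := by
            rw [hlen, Nat.mul_div_cancel _ (by omega)]
          rw [← hmq]
          exact hrep
        · intro hrep
          have hck : chunksA amount.toNat digits =
              List.replicate (digits.length / amount.toNat) (digits.take amount.toNat) := by
            conv_lhs => rw [hrep]
            exact chunksA_repChunk amount.toNat ha _ hc0len _
          have hm1 : 1 ≤ digits.length / amount.toNat := (Nat.one_le_div_iff (by omega)).mpr hna
          intro c hc
          rw [hck] at hc ⊢
          have hceq := List.eq_of_mem_replicate hc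
          rcases Nat.exists_eq_add_of_le hm1 with ⟨m', hm'⟩
          rw [hceq, hm', Nat.add_comm, List.replicate_succ]
          rfl
    · -- non-divisible case: the shorter last chunk matches only when it is the single chunk
      rw [if_pos (by simp [hm])]
      have hdvd' : ¬ amount.toNat ∣ digits.length := fun h => hm (hmod.mpr h)
      have hpos : 0 < digits.length := by
        rcases Nat.eq_zero_or_pos digits.length with h0 | h
        · exact absurd (h0 ▸ Dvd.intro 0 rfl) hdvd'
        · exact h
      by_cases hna : digits.length ≤ amount.toNat
      · -- single (possibly shorter) chunk: both sides true
        have hne : digits ≠ [] := by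
          intro h
          rw [h] at hpos
          simp at hpos
        have hLone : chunksA amount.toNat digits = [digits] := by
          rw [chunksA_cons amount.toNat ha digits hne, List.take_of_length_le hna,
            List.drop_eq_nil_of_le hna, chunksA_nil]
        have hnum1 : -(PySem.Int.floordiv (-((digits.length : Nat) : Int)) amount) ≤ 1 := by
          rw [hnum_le, one_mul, ← hcast]
          exact_mod_cast hna
        rw [hLone]
        simp [allEqFirst, hnum1]
      · -- more than one chunk, last one shorter: both sides false
        push_neg at hna
        have hnumgt : ¬ (-(PySem.Int.floordiv (-((digits.length : Nat) : Int)) amount) ≤ 1) := by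
          rw [hnum_le, one_mul, ← hcast]
          intro h
          exact absurd (by exact_mod_cast h) (by omega)
        cases hAE : allEqFirst (chunksA amount.toNat digits) (chunksA amount.toNat digits) with
        | false => simp [hnumgt]
        | true =>
          exfalso
          have hall := (allEqFirst_iff _).mp hAE
          have hrep := all_eq_repChunk amount.toNat ha digits hall
          have hc0len : (digits.take amount.toNat).length = amount.toNat := by
            rw [List.length_take]
            omega
          have hlen : digits.length = (chunksA amount.toNat digits).length * amount.toNat := by
            conv_lhs => rw [hrep]
            rw [repChunk_length, hc0len]
          exact hdvd' ⟨(chunksA amount.toNat digits).length, by rw [hlen, Nat.mul_comm]⟩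

theorem empty_neg_eq (amount : Int) (lt : Bool) (hneg : amount < 0) :
    check_repeating [] amount lt = check_repeating_alt [] amount lt := by
  have hf0 : PySem.Int.floordiv 0 amount = 0 := by simp [PySem.Int.floordiv]
  have hm0 : PySem.Int.mod (0 : Int) amount = 0 :=
    (PySem.Int.mod_eq_zero_iff_dvd _ _).mpr (dvd_zero _)
  rw [check_repeating, check_repeating_alt]
  simp [outerLoop, allEqFirst, repChunk, hf0, hm0]

-- ===== VERDICT (by name: the statement is the Claim_ definition above) =====
theorem check_repeating_spec : Claim_equal_check_repeating := by
  intro digits amount lt _ hpre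
  unfold Spec_check_repeating
  rcases hpre with h1 | ⟨hd, hneg⟩
  · exact main_eq digits amount lt h1
  · subst hd; exact empty_neg_eq amount lt hneg
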